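-- pv_equiv track=rewrite | github.com/yoobie-doo/jiifto | utils/jiifto_predict.py | get_word_boundaries
-- ===== SOURCE A (Python) =====
-- from itertools import groupby
--
-- def get_word_boundaries(syllables_w_sp):
--     """Extract word_start/word_end for syllables-only sequence."""
--     res = []
--     for k, g in groupby(syllables_w_sp, lambda x: x == 'SP'):
--         if not k:
--             res.append(list(g))
--
--     word_start, word_end = [], []
--     for word in res:
--         if word:
--             word_start.append(word[0])
--             word_end.append(word[-1])
--     return word_start, word_end
-- ===== SOURCE B (Python) =====
-- def get_word_boundaries(syllables_w_sp):
--     """Extract word_start/word_end for syllables-only sequence."""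
--     word_start, word_end = [], []
--     in_word = False
--     last = None
--     for syl in syllables_w_sp:
--         if syl == 'SP':
--             if in_word:
--                 word_end.append(last)
--                 in_word = False
--         else:
--             if not in_word:
--                 word_start.append(syl)
--                 in_word = True
--             last = syl
--     if in_word:
--         word_end.append(last)
--     return word_start, word_end
-- ===== Notes on version B (the rewrite author's own statement) =====
-- stated objective: alternative
-- what changed: Replaces groupby-based grouping (materialising a list of per-word syllable lists, then a second loop over it) with a single-pass state machine that tracks an in_word flag and the last non-'SP' syllable, maintaining only the two boundary lists.
import Mathlib
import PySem

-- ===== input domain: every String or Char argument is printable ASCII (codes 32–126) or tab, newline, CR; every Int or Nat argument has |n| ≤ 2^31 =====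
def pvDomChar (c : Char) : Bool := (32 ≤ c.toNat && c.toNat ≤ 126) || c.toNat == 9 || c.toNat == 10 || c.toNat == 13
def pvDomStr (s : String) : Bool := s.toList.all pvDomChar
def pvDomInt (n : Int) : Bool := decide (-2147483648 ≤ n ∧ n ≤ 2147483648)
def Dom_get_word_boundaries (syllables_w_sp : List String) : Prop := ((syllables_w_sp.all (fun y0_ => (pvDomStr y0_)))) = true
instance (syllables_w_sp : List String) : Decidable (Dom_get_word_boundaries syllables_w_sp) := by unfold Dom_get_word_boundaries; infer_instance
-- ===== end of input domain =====

-- B replaces A's groupby-plus-second-loop (which materialises per-word syllable lists)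
-- with a single-pass state machine keeping an in_word flag and the last non-'SP' syllable.

-- ===== PORT A =====
-- itertools.groupby helper: take the maximal initial run of elements whose key (x == 'SP') equals k.
def pvTakeRun (k : Bool) : List String → List String × List String
  | [] => ([], [])
  | x :: xs =>
    if (x == "SP") == k then
      let p := pvTakeRun k xs
      (x :: p.1, p.2)
    else ([], x :: xs)

theorem pvTakeRun_snd_length (k : Bool) : ∀ xs : List String, (pvTakeRun k xs).2.length ≤ xs.length := by
  intro xs
  induction xs with
  | nil => simp [pvTakeRun]
  | cons x xs ih =>
    simp only [pvTakeRun]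
    split
    · exact Nat.le_succ_of_le ih
    · simp

-- groupby(syllables_w_sp, lambda x: x == 'SP') as a list of (key, group) pairs.
def pvGroupBy : List String → List (Bool × List String)
  | [] => []
  | x :: xs =>
    let k := x == "SP"
    let p := pvTakeRun k xs
    (k, x :: p.1) :: pvGroupBy p.2
termination_by xs => xs.length
decreasing_by
  exact Nat.lt_succ_of_le (pvTakeRun_snd_length _ _)

def get_word_boundaries (syllables_w_sp : List String) : List String × List String :=
  -- first loop: res collects the groups whose key is False
  let res := (pvGroupBy syllables_w_sp).foldl
    (fun r kg => if kg.1 = false then r ++ [kg.2] else r) []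
  -- second loop: word[0] / word[-1] of each non-empty word (groups are non-empty, so the
  -- Python indexings cannot raise; headD/getLastD under the guard are exact)
  res.foldl
    (fun se w => if w ≠ [] then (se.1 ++ [w.headD ""], se.2 ++ [w.getLastD ""]) else se)
    ([], [])

-- ===== PORT B =====
-- single-pass state machine: in_word flag, last non-'SP' syllable seen (""
-- stands for Python's initial None; it is never read while in_word is false).
def pvLoopB : List String → Bool → String → List String → List String → List String × List String
  | [], in_word, last, word_start, word_end =>
    if in_word then (word_start, word_end ++ [last]) else (word_start, word_end)
  | syl :: rest, in_word, last, word_start, word_end =>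
    if syl == "SP" then
      if in_word then pvLoopB rest false last word_start (word_end ++ [last])
      else pvLoopB rest false last word_start word_end
    else
      if in_word then pvLoopB rest true syl word_start word_end
      else pvLoopB rest true syl (word_start ++ [syl]) word_end

def get_word_boundaries_alt (syllables_w_sp : List String) : List String × List String :=
  pvLoopB syllables_w_sp false "" [] []

-- ===== PRECONDITION & SPEC =====
def Spec_get_word_boundaries (syllables_w_sp : List String) (out : List String × List String) : Prop := out = get_word_boundaries_alt syllables_w_sp
instance (syllables_w_sp : List String) (out : List String × List String) : Decidable (Spec_get_word_boundaries syllables_w_sp out) := by unfold Spec_get_word_boundaries; infer_instance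

-- ===== CLAIM (what is proved, stated in full; the proofs are below) =====
def Claim_equal_get_word_boundaries : Prop := ∀ (syllables_w_sp : List String), Dom_get_word_boundaries syllables_w_sp → Spec_get_word_boundaries syllables_w_sp (get_word_boundaries syllables_w_sp)

-- ===== LEMMAS AND PROOFS =====

-- first syllables / last syllables of the non-'SP' groups, as A computes them
def pvStarts (xs : List String) : List String :=
  ((pvGroupBy xs).filter (fun p => p.1 = false)).map (fun p => p.2.headD "")
def pvEnds (xs : List String) : List String :=
  ((pvGroupBy xs).filter (fun p => p.1 = false)).map (fun p => p.2.getLastD "")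

theorem pvTakeRun_eq (k : Bool) : ∀ xs : List String,
    xs = (pvTakeRun k xs).1 ++ (pvTakeRun k xs).2 ∧
    (∀ a ∈ (pvTakeRun k xs).1, (a == "SP") = k) ∧
    ((pvTakeRun k xs).2 = [] ∨ ∃ y ys, (pvTakeRun k xs).2 = y :: ys ∧ (y == "SP") ≠ k) := by
  intro xs
  induction xs with
  | nil => simp [pvTakeRun]
  | cons x xs ih =>
    simp only [pvTakeRun]
    by_cases h : ((x == "SP") == k) = true
    · rw [if_pos h]
      have h' : (x == "SP") = k := by simpa using h
      obtain ⟨h1, h2, h3⟩ := ih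
      refine ⟨?_, ?_, h3⟩
      · rw [List.cons_append, ← h1]
      · intro a ha
        rcases List.mem_cons.mp ha with rfl | ha
        · exact h'
        · exact h2 a ha
    · rw [if_neg h]
      have h' : ¬(x == "SP") = k := by simpa using h
      exact ⟨by simp, by simp, Or.inr ⟨x, xs, rfl, h'⟩⟩

-- skipping a run of 'SP' while not in a word changes nothing
theorem pvLoopB_skipSP : ∀ (r : List String), (∀ a ∈ r, (a == "SP") = true) →
    ∀ (tail : List String) (l : String) (ws we : List String),
    pvLoopB (r ++ tail) false l ws we = pvLoopB tail false l ws we := by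
  intro r
  induction r with
  | nil => intro _ tail l ws we; simp
  | cons a r ih =>
    intro h tail l ws we
    have ha : (a == "SP") = true := h a (List.mem_cons_self ..)
    rw [List.cons_append]
    have step : pvLoopB (a :: (r ++ tail)) false l ws we = pvLoopB (r ++ tail) false l ws we := by
      simp [pvLoopB, ha]
    rw [step]
    exact ih (fun b hb => h b (List.mem_cons_of_mem _ hb)) tail l ws we

-- consuming a run of non-'SP' syllables while in a word only updates 'last'
theorem pvLoopB_run : ∀ (r : List String), (∀ a ∈ r, (a == "SP") = false) →
    ∀ (tail : List String) (l : String) (ws we : List String),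
    pvLoopB (r ++ tail) true l ws we = pvLoopB tail true (r.getLastD l) ws we := by
  intro r
  induction r with
  | nil => intro _ tail l ws we; simp
  | cons a r ih =>
    intro h tail l ws we
    have ha : (a == "SP") = false := h a (List.mem_cons_self ..)
    rw [List.cons_append]
    have step : pvLoopB (a :: (r ++ tail)) true l ws we = pvLoopB (r ++ tail) true a ws we := by
      simp [pvLoopB, ha]
    rw [step, ih (fun b hb => h b (List.mem_cons_of_mem _ hb)), List.getLastD_cons]

-- main invariant: from the not-in-word state, B appends exactly A's starts/ends
theorem pvLoopB_main_aux : ∀ (n : Nat) (xs : List String), xs.length ≤ n →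
    ∀ (l : String) (ws we : List String),
    pvLoopB xs false l ws we = (ws ++ pvStarts xs, we ++ pvEnds xs) := by
  intro n
  induction n with
  | zero =>
    intro xs hx l ws we
    have : xs = [] := List.eq_nil_of_length_eq_zero (Nat.le_zero.mp hx)
    subst this
    simp [pvLoopB, pvStarts, pvEnds, pvGroupBy]
  | succ n ih =>
    intro xs hx l ws we
    match xs with
    | [] => simp [pvLoopB, pvStarts, pvEnds, pvGroupBy]
    | x :: xs =>
      obtain ⟨heq, hall, hrest⟩ := pvTakeRun_eq (x == "SP") xs
      have hgroup : pvGroupBy (x :: xs)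
          = ((x == "SP"), x :: (pvTakeRun (x == "SP") xs).1)
            :: pvGroupBy (pvTakeRun (x == "SP") xs).2 := by
        rw [pvGroupBy]
      have hlen : (pvTakeRun (x == "SP") xs).2.length ≤ n :=
        le_trans (pvTakeRun_snd_length _ _)
          (by simpa using Nat.le_of_succ_le_succ hx)
      by_cases hsp : (x == "SP") = true
      · -- run of 'SP': its group is filtered out
        have step : pvLoopB (x :: xs) false l ws we = pvLoopB xs false l ws we := by
          simp [pvLoopB, hsp]
        have hs : pvStarts (x :: xs) = pvStarts (pvTakeRun (x == "SP") xs).2 := by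
          simp [pvStarts, hgroup, hsp]
        have he : pvEnds (x :: xs) = pvEnds (pvTakeRun (x == "SP") xs).2 := by
          simp [pvEnds, hgroup, hsp]
        conv_lhs => rw [step, heq]
        rw [pvLoopB_skipSP _ (by intro a ha; rw [hall a ha, hsp]) _ l ws we,
          ih _ hlen l ws we, hs, he]
      · -- non-'SP' group: its head goes to word_start, its last to word_end
        have hsp' : (x == "SP") = false := by simpa using hsp
        have step : pvLoopB (x :: xs) false l ws we = pvLoopB xs true x (ws ++ [x]) we := by
          simp [pvLoopB, hsp']
        have hs : pvStarts (x :: xs) = x :: pvStarts (pvTakeRun (x == "SP") xs).2 := by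
          simp [pvStarts, hgroup, hsp']
        have he : pvEnds (x :: xs)
            = ((pvTakeRun (x == "SP") xs).1.getLastD x) :: pvEnds (pvTakeRun (x == "SP") xs).2 := by
          simp only [pvEnds, hgroup, hsp', List.filter_cons, List.map_cons, List.getLastD_cons,
            decide_true, if_true]
        conv_lhs => rw [step, heq]
        rw [pvLoopB_run _ (by intro a ha; rw [hall a ha, hsp']) _ x (ws ++ [x]) we]
        rcases hrest with h0 | ⟨y, ys, hy, hne⟩
        · rw [h0, hs, he, h0]
          simp [pvLoopB, pvStarts, pvEnds, pvGroupBy]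
        · have hySP : (y == "SP") = true := by
            rw [hsp'] at hne; simpa using hne
          have step2 : pvLoopB (pvTakeRun (x == "SP") xs).2 true
                ((pvTakeRun (x == "SP") xs).1.getLastD x) (ws ++ [x]) we
              = pvLoopB (pvTakeRun (x == "SP") xs).2 false
                  ((pvTakeRun (x == "SP") xs).1.getLastD x) (ws ++ [x])
                  (we ++ [(pvTakeRun (x == "SP") xs).1.getLastD x]) := by
            rw [hy]; simp [pvLoopB, hySP]
          rw [step2, ih _ hlen, hs, he]
          simp

theorem pvLoopB_main (xs : List String) (l : String) (ws we : List String) :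
    pvLoopB xs false l ws we = (ws ++ pvStarts xs, we ++ pvEnds xs) :=
  pvLoopB_main_aux xs.length xs le_rfl l ws we

-- A's first foldl collects exactly the non-'SP' groups
theorem pv_foldl_groups (gs : List (Bool × List String)) :
    ∀ acc : List (List String),
    gs.foldl (fun r kg => if kg.1 = false then r ++ [kg.2] else r) acc
      = acc ++ (gs.filter (fun p => p.1 = false)).map Prod.snd := by
  induction gs with
  | nil => simp
  | cons g gs ih =>
    intro acc
    rw [List.foldl_cons, List.filter_cons]
    by_cases h : g.1 = false
    · simp [h, ih]
    · simp [h, ih]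

-- A's second foldl maps head/last over the non-empty words
theorem pv_foldl_bounds (ws : List (List String)) :
    ∀ acc : List String × List String,
    ws.foldl (fun se w => if w ≠ [] then (se.1 ++ [w.headD ""], se.2 ++ [w.getLastD ""]) else se) acc
      = (acc.1 ++ (ws.filter (fun w => w ≠ [])).map (fun w => w.headD ""),
         acc.2 ++ (ws.filter (fun w => w ≠ [])).map (fun w => w.getLastD "")) := by
  induction ws with
  | nil => simp
  | cons w ws ih =>
    intro acc
    rw [List.foldl_cons, ih, List.filter_cons]
    by_cases h : w = []
    · simp [h]
    · simp [h]

-- every group produced by pvGroupBy is non-empty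
theorem pvGroupBy_ne_nil : ∀ (n : Nat) (xs : List String), xs.length ≤ n →
    ∀ p ∈ pvGroupBy xs, p.2 ≠ [] := by
  intro n
  induction n with
  | zero =>
    intro xs hx
    have : xs = [] := List.eq_nil_of_length_eq_zero (Nat.le_zero.mp hx)
    subst this
    simp [pvGroupBy]
  | succ n ih =>
    intro xs hx p hp
    match xs with
    | [] => simp [pvGroupBy] at hp
    | x :: xs =>
      rw [pvGroupBy] at hp
      have hlen : (pvTakeRun (x == "SP") xs).2.length ≤ n :=
        le_trans (pvTakeRun_snd_length _ _) (by simpa using Nat.le_of_succ_le_succ hx)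
      rcases List.mem_cons.mp hp with heq | hp'
      · subst heq; simp
      · exact ih _ hlen p hp'

-- ===== VERDICT (by name: the statement is the Claim_ definition above) =====
theorem get_word_boundaries_spec : Claim_equal_get_word_boundaries := by
  intro xs _
  unfold Spec_get_word_boundaries get_word_boundaries get_word_boundaries_alt
  rw [pv_foldl_groups, pv_foldl_bounds, pvLoopB_main]
  have hfilter : (((pvGroupBy xs).filter (fun p => p.1 = false)).map Prod.snd).filter
        (fun w => w ≠ [])
      = ((pvGroupBy xs).filter (fun p => p.1 = false)).map Prod.snd := by
    apply List.filter_eq_self.mpr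
    intro w hw
    obtain ⟨p, hp, rfl⟩ := List.mem_map.mp hw
    have := pvGroupBy_ne_nil xs.length xs le_rfl p (List.mem_of_mem_filter hp)
    simpa using this
  simp only [List.nil_append, hfilter, List.map_map, pvStarts, pvEnds]
  rfl
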